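-- pv_equiv track=rewrite | github.com/bluedog129/PythonAlgo | Programmers/notEnoughMoney.py | solution
-- ===== SOURCE A (Python) =====
-- def solution(price, money, count):
--     answer = 0
--     original_price = price
--
--     for i in range(1, count+1):
--         money -= price
--         price += original_price
--
--     if money < 0:
--         answer = money * (-1)
--
--     return answer
-- ===== SOURCE B (Python) =====
-- def solution(price, money, count):
--     n = count if count > 0 else 0
--     total = price * n * (n + 1) // 2
--     shortfall = total - money
--     return shortfall if shortfall > 0 else 0
-- ===== Notes on version B (the rewrite author's own statement) =====
-- stated objective: faster
-- what changed: Replaces the O(count) loop that subtracts price, 2*price, ... from money with the closed-form arithmetic-series total price*n*(n+1)//2 and returns max(0, total-money).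
import Mathlib
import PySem

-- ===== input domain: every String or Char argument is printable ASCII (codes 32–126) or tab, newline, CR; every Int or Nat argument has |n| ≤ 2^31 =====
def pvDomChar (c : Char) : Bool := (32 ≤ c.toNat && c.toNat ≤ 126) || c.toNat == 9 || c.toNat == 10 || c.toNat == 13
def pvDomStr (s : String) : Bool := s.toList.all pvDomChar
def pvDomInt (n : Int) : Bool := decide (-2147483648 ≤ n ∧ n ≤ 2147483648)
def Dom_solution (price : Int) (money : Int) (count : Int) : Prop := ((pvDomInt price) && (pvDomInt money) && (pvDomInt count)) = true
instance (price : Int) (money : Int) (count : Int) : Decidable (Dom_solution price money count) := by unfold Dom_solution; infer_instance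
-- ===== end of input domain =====

-- B replaces the O(count) subtraction loop with the closed-form series total price*n*(n+1)//2 (faster, O(1)).

-- ===== PORT A =====
-- literal port: loop over range(1, count+1) carrying (money, price); original_price stays fixed
def solution (price : Int) (money : Int) (count : Int) : Int :=
  let original_price := price
  let st := (PySem.List.pyRange 1 (count + 1) 1).foldl
    (fun (s : Int × Int) _ => (s.1 - s.2, s.2 + original_price)) (money, price)
  let money := st.1
  let answer : Int := 0
  let answer := if money < 0 then money * (-1) else answer
  answer

-- ===== PORT B =====
def solution_alt (price : Int) (money : Int) (count : Int) : Int :=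
  let n := if count > 0 then count else 0
  let total := PySem.Int.floordiv (price * n * (n + 1)) 2
  let shortfall := total - money
  if shortfall > 0 then shortfall else 0

-- ===== PRECONDITION & SPEC =====
def Spec_solution (price : Int) (money : Int) (count : Int) (out : Int) : Prop := out = solution_alt price money count
instance (price : Int) (money : Int) (count : Int) (out : Int) : Decidable (Spec_solution price money count out) := by unfold Spec_solution; infer_instance

-- ===== CLAIM (what is proved, stated in full; the proofs are below) =====
def Claim_equal_solution : Prop := ∀ (price : Int) (money : Int) (count : Int), Dom_solution price money count → Spec_solution price money count (solution price money count)

-- ===== LEMMAS AND PROOFS =====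

-- triangular number T n = 0 + 1 + ... + (n-1)
def pvT : Nat → Int
  | 0 => 0
  | n + 1 => pvT n + n

theorem pvT_closed (n : Nat) : 2 * ((n : Int) + pvT n) = (n : Int) * ((n : Int) + 1) := by
  induction n with
  | zero => simp [pvT]
  | succ k ih =>
    have : pvT (k + 1) = pvT k + k := rfl
    push_cast [this]
    push_cast at ih
    nlinarith [ih]

-- the loop over any list of length n maps (m, p) to (m - n*p - o*T n, p + n*o)
theorem pv_loop (l : List Int) (o : Int) : ∀ (m p : Int),
    l.foldl (fun (s : Int × Int) _ => (s.1 - s.2, s.2 + o)) (m, p)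
      = (m - l.length * p - o * pvT l.length, p + l.length * o) := by
  induction l with
  | nil => intro m p; simp [pvT]
  | cons x xs ih =>
    intro m p
    simp only [List.foldl_cons, List.length_cons, ih]
    have ht : pvT (xs.length + 1) = pvT xs.length + xs.length := rfl
    rw [ht]
    exact Prod.ext (by push_cast; ring) (by push_cast; ring)

-- ===== VERDICT (by name: the statement is the Claim_ definition above) =====
theorem solution_spec : Claim_equal_solution := by
  intro price money count _
  simp only [Spec_solution, solution, solution_alt]
  rw [pv_loop]
  simp only [PySem.List.length_pyRange_one]
  set n : Nat := (count + 1 - 1).toNat with hn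
  have hcase : (if count > 0 then count else 0) = (n : Int) := by
    rw [hn]; split_ifs with h <;> omega
  rw [hcase]
  have h2 : price * (n : Int) * ((n : Int) + 1) = 2 * (price * ((n : Int) + pvT n)) := by
    rw [show (2:Int) * (price * ((n : Int) + pvT n)) = price * (2 * ((n : Int) + pvT n)) by ring,
      pvT_closed n]; ring
  rw [h2, PySem.Int.floordiv_eq_ediv_of_pos (by omega : (0:Int) < 2)]
  rw [Int.mul_ediv_cancel_left _ (by omega : (2:Int) ≠ 0)]
  have : money - (n : Int) * price - price * pvT n = money - (price * ((n : Int) + pvT n)) := by ring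
  rw [this]
  split_ifs <;> omega
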